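-- pv_equiv track=rewrite | github.com/jr0612/proyecto-programacion-1 | detectar_idioma.py | detectar_idioma_2
-- ===== SOURCE A (Python) =====
-- def detectar_idioma_2(texto):
--     patrones_idiomas = {"español": "aeiouáéíóúüñ", "ingles": "aeiouy", "frances": "aeiouàâéèêëîïôùûüÿ", "aleman": "aeiouäöüß","portugues": "aeiouáâãàéêíóôõúü"
--     }
--     letras = ''.join(filter(str.isalpha, texto.lower()))
--     frecuencias = {}
--     for idioma, patrones in patrones_idiomas.items():
--         frecuencias[idioma] = sum(letra in patrones for letra in letras)
--     idioma_detectado = max(frecuencias, key=frecuencias.get)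
--
--     return idioma_detectado
-- ===== SOURCE B (Python) =====
-- def detectar_idioma_2(texto):
--     patrones_idiomas = {"español": "aeiouáéíóúüñ", "ingles": "aeiouy", "frances": "aeiouàâéèêëîïôùûüÿ", "aleman": "aeiouäöüß","portugues": "aeiouáâãàéêíóôõúü"
--     }
--     letras = [ch for ch in texto.lower() if ch.isalpha()]
--     conteo = {}
--     for ch in letras:
--         conteo[ch] = conteo.get(ch, 0) + 1
--     mejor = None
--     mejor_valor = 0
--     for idioma, patrones in patrones_idiomas.items():
--         total = sum(conteo.get(ch, 0) for ch in patrones)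
--         if mejor is None or total > mejor_valor:
--             mejor, mejor_valor = idioma, total
--     return mejor
-- ===== Notes on version B (the rewrite author's own statement) =====
-- stated objective: faster
-- what changed: B builds a single letter-frequency table in one pass over the text and computes each language's score by summing table counts over its short vowel pattern with a running maximum, instead of A re-scanning the whole text once per language and calling max over a dict.
import Mathlib
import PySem

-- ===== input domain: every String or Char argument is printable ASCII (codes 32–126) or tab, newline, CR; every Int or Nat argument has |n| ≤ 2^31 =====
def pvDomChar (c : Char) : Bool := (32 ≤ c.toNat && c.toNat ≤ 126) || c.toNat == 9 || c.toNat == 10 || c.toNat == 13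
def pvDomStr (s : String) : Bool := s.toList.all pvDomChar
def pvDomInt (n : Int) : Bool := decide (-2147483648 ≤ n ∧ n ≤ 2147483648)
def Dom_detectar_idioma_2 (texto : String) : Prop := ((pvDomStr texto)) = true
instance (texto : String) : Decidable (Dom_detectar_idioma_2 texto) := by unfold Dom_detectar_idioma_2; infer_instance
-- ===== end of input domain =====

-- B replaces A's per-language rescans of the whole text by one letter-frequency table built in a single
-- pass, summing table counts over each language's short vowel pattern (objective: faster, constant-factor).

-- ===== PORT A =====
def detectar_idioma_2 (texto : String) : String :=
  let patrones_idiomas : List (String × String) :=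
    [("español", "aeiouáéíóúüñ"), ("ingles", "aeiouy"), ("frances", "aeiouàâéèêëîïôùûüÿ"),
     ("aleman", "aeiouäöüß"), ("portugues", "aeiouáâãàéêíóôõúü")]
  let letras : List Char := (PySem.Chars.lower texto.toList).filter (fun c => PySem.Chars.isalpha c)
  let frecuencias : PySem.Dict String Int :=
    patrones_idiomas.foldl (fun d p =>
      d.insert p.1 ((letras.map (fun letra => if p.2.toList.contains letra then (1 : Int) else 0)).sum))
      PySem.Dict.empty
  (PySem.List.max? frecuencias.keys (fun k => frecuencias.getD k 0)).getD ""

-- ===== PORT B =====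
def detectar_idioma_2_alt (texto : String) : String :=
  let patrones_idiomas : List (String × String) :=
    [("español", "aeiouáéíóúüñ"), ("ingles", "aeiouy"), ("frances", "aeiouàâéèêëîïôùûüÿ"),
     ("aleman", "aeiouäöüß"), ("portugues", "aeiouáâãàéêíóôõúü")]
  let letras : List Char := (PySem.Chars.lower texto.toList).filter (fun ch => PySem.Chars.isalpha ch)
  let conteo : PySem.Dict Char Int :=
    letras.foldl (fun d ch => d.insert ch (d.getD ch 0 + 1)) PySem.Dict.empty
  let r : Option String × Int :=
    patrones_idiomas.foldl (fun acc p =>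
      let total : Int := (p.2.toList.map (fun ch => conteo.getD ch 0)).sum
      if acc.1 = none ∨ total > acc.2 then (some p.1, total) else acc) (none, 0)
  match r.1 with
  | some m => m
  | none => ""

-- ===== PRECONDITION & SPEC =====
def Spec_detectar_idioma_2 (texto : String) (out : String) : Prop := out = detectar_idioma_2_alt texto
instance (texto : String) (out : String) : Decidable (Spec_detectar_idioma_2 texto out) := by unfold Spec_detectar_idioma_2; infer_instance

-- ===== CLAIM (what is proved, stated in full; the proofs are below) =====
def Claim_equal_detectar_idioma_2 : Prop := ∀ (texto : String), Dom_detectar_idioma_2 texto → Spec_detectar_idioma_2 texto (detectar_idioma_2 texto)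

-- ===== LEMMAS AND PROOFS =====

-- sum over a pattern of per-letter counts = sum over the letters of a membership indicator (pattern nodup)
theorem pv_ind_sum_zero (P : List Char) (a : Char) (h : a ∉ P) :
    (P.map (fun ch => if ch = a then (1 : Int) else 0)).sum = 0 := by
  induction P with
  | nil => simp
  | cons c P ih =>
    simp only [List.mem_cons, not_or] at h
    simp [ih h.2, Ne.symm h.1]

theorem pv_ind_sum (P : List Char) (a : Char) (h : P.Nodup) :
    (P.map (fun ch => if ch = a then (1 : Int) else 0)).sum
      = if P.contains a then 1 else 0 := by
  induction P with
  | nil => simp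
  | cons c P ih =>
    rcases List.nodup_cons.mp h with ⟨hc, hP⟩
    by_cases hca : c = a
    · subst hca
      simp [pv_ind_sum_zero P c hc]
    · have : ¬ a = c := fun h => hca h.symm
      simp [ih hP, hca, this]

theorem pv_sum_count (P L : List Char) (h : P.Nodup) :
    (P.map (fun ch => (L.count ch : Int))).sum
      = (L.map (fun l => if P.contains l then (1 : Int) else 0)).sum := by
  induction L with
  | nil => simp
  | cons a L ih =>
    have h1 : (P.map (fun ch => ((a :: L).count ch : Int))).sum
        = (P.map (fun ch => (L.count ch : Int) + (if ch = a then (1 : Int) else 0))).sum := by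
      apply congrArg
      apply List.map_congr_left
      intro x _
      by_cases hxa : x = a <;> simp [List.count_cons, hxa]
      intro h; exact hxa h.symm
    rw [h1, PySem.List.sum_map_add_int, ih, pv_ind_sum P a h]
    simp [add_comm]

-- ===== VERDICT (by name: the statement is the Claim_ definition above) =====
set_option maxHeartbeats 1000000 in
theorem detectar_idioma_2_spec : Claim_equal_detectar_idioma_2 := by
  intro texto _
  unfold Spec_detectar_idioma_2 detectar_idioma_2 detectar_idioma_2_alt
  set L : List Char := (PySem.Chars.lower texto.toList).filter (fun c => PySem.Chars.isalpha c) with hL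
  simp only [List.foldl, PySem.Dict.getD_foldl_insert_add_one, PySem.Dict.getD_empty, zero_add]
  rw [pv_sum_count "aeiouáéíóúüñ".toList L (by decide), pv_sum_count "aeiouy".toList L (by decide),
      pv_sum_count "aeiouàâéèêëîïôùûüÿ".toList L (by decide), pv_sum_count "aeiouäöüß".toList L (by decide),
      pv_sum_count "aeiouáâãàéêíóôõúü".toList L (by decide)]
  generalize (List.map (fun l => if "aeiouáéíóúüñ".toList.contains l = true then (1:Int) else 0) L).sum = v1
  generalize (List.map (fun l => if "aeiouy".toList.contains l = true then (1:Int) else 0) L).sum = v2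
  generalize (List.map (fun l => if "aeiouàâéèêëîïôùûüÿ".toList.contains l = true then (1:Int) else 0) L).sum = v3
  generalize (List.map (fun l => if "aeiouäöüß".toList.contains l = true then (1:Int) else 0) L).sum = v4
  generalize (List.map (fun l => if "aeiouáâãàéêíóôõúü".toList.contains l = true then (1:Int) else 0) L).sum = v5
  simp only [true_or, if_true, reduceCtorEq, false_or, gt_iff_lt,
    PySem.Dict.getD_insert, PySem.Dict.getD_empty]
  have hk : (((((PySem.Dict.empty.insert "español" v1).insert "ingles" v2).insert "frances" v3).insert "aleman" v4).insert
      "portugues" v5).keys = ["español", "ingles", "frances", "aleman", "portugues"] := by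
    simp [PySem.Dict.keys_insert_of_not_contains, PySem.Dict.contains_insert, PySem.Dict.contains_empty,
      PySem.Dict.keys_empty]
  rw [hk]
  simp only [PySem.List.max?, List.foldl, String.reduceEq, if_false, if_true]
  split_ifs <;> simp_all
  all_goals (repeat (first | rfl | omega | (split_ifs <;> (try omega) <;> (try rfl) <;> (try simp_all))))
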